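-- pv_equiv track=rewrite | github.com/edithturn/leetcode-training | basic_top_interview_question/python/18_aba_transalate.py | aba_translate
-- ===== SOURCE A (Python) =====
-- def aba_translate(string):
--     vowels_min = ['a', 'e', 'i', 'o', 'u']
--     vowels_max = ['A', 'E', 'I', 'O', 'U']
--     new_string = ""
--
--     for letter in string:
--         new_string += letter
--         if letter in vowels_min or letter in vowels_max:
--             new_string += 'b'
--             new_string += letter.lower()
--     return new_string
-- ===== SOURCE B (Python) =====
-- _ABA_TABLE = {ord(c): c + 'b' + c.lower() for c in 'aeiouAEIOU'}
--
-- def aba_translate(string):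
--     return string.translate(_ABA_TABLE)
-- ===== Notes on version B (the rewrite author's own statement) =====
-- stated objective: faster
-- what changed: Replaces the explicit per-character append-and-branch loop (with repeated string concatenation) by a prebuilt codepoint-to-replacement translation table dispatched through a single str.translate pass.
import Mathlib
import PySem

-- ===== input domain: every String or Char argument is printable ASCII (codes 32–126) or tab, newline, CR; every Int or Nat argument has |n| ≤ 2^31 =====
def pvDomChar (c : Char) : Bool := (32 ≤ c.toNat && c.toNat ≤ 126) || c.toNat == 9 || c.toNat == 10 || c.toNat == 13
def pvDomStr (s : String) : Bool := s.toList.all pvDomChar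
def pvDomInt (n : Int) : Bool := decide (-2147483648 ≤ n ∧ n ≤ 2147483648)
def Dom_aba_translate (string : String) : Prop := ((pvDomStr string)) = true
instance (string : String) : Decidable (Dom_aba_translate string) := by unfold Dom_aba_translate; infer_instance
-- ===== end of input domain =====

-- B replaces A's explicit append-and-branch loop by a prebuilt vowel->replacement
-- translation table dispatched through one str.translate pass (idiomatic).

-- ===== PORT A =====
-- literal transliteration of A: fold over the characters, appending the letter and,
-- if it is a vowel, 'b' plus its lowercase form (strings handled on the List Char side).
def aba_translate (string : String) : String :=
  let vowels_min : List Char := ['a', 'e', 'i', 'o', 'u']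
  let vowels_max : List Char := ['A', 'E', 'I', 'O', 'U']
  String.mk (string.toList.foldl
    (fun new_string letter =>
      let new_string := new_string ++ [letter]
      if letter ∈ vowels_min ∨ letter ∈ vowels_max then
        new_string ++ ['b'] ++ [PySem.Chars.lowerChar letter]
      else new_string)
    [])

-- ===== PORT B =====
-- the translation table {ord(c): c + 'b' + c.lower() for c in 'aeiouAEIOU'}
def abaTable : PySem.Dict Char (List Char) :=
  PySem.Dict.ofList (("aeiouAEIOU".toList).map
    (fun c => (c, [c, 'b', PySem.Chars.lowerChar c])))

-- str.translate: each character is replaced by its table entry, characters absent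
-- from the table pass through unchanged.
def aba_translate_alt (string : String) : String :=
  String.mk (string.toList.flatMap (fun c => abaTable.getD c [c]))

-- ===== PRECONDITION & SPEC =====
def Spec_aba_translate (string : String) (out : String) : Prop := out = aba_translate_alt string
instance (string : String) (out : String) : Decidable (Spec_aba_translate string out) := by unfold Spec_aba_translate; infer_instance

-- ===== CLAIM (what is proved, stated in full; the proofs are below) =====
def Claim_equal_aba_translate : Prop := ∀ (string : String), Dom_aba_translate string → Spec_aba_translate string (aba_translate string)

-- ===== LEMMAS AND PROOFS =====

-- per-character agreement: A's branch produces exactly B's table entry (or the identity)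
theorem abaTable_eq : abaTable = PySem.Dict.mk
    [('a',['a','b','a']),('e',['e','b','e']),('i',['i','b','i']),('o',['o','b','o']),('u',['u','b','u']),
     ('A',['A','b','a']),('E',['E','b','e']),('I',['I','b','i']),('O',['O','b','o']),('U',['U','b','u'])] := by
  decide

theorem aba_step_eq (c : Char) :
    (if c ∈ (['a','e','i','o','u'] : List Char) ∨ c ∈ (['A','E','I','O','U'] : List Char)
      then [c] ++ ['b'] ++ [PySem.Chars.lowerChar c] else [c])
    = abaTable.getD c [c] := by
  by_cases h : c ∈ (['a','e','i','o','u'] : List Char) ∨ c ∈ (['A','E','I','O','U'] : List Char)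
  · rcases h with h | h <;> fin_cases h <;> decide
  · simp only [if_neg h]
    simp only [not_or, List.mem_cons, List.not_mem_nil, or_false, not_or] at h
    obtain ⟨⟨h1,h2,h3,h4,h5⟩,⟨h6,h7,h8,h9,h10⟩⟩ := h
    simp only [abaTable_eq, PySem.Dict.getD, PySem.Dict.get?_mk_cons, beq_iff_eq]
    simp [PySem.Dict.get?, Ne.symm h1, Ne.symm h2, Ne.symm h3, Ne.symm h4, Ne.symm h5,
      Ne.symm h6, Ne.symm h7, Ne.symm h8, Ne.symm h9, Ne.symm h10]

-- A's foldl with accumulator equals acc ++ the flatMap B computes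
theorem aba_fold_eq (l : List Char) (acc : List Char) :
    l.foldl
      (fun new_string letter =>
        let new_string := new_string ++ [letter]
        if letter ∈ (['a','e','i','o','u'] : List Char) ∨ letter ∈ (['A','E','I','O','U'] : List Char)
          then new_string ++ ['b'] ++ [PySem.Chars.lowerChar letter]
          else new_string)
      acc
    = acc ++ l.flatMap (fun c => abaTable.getD c [c]) := by
  induction l generalizing acc with
  | nil => simp
  | cons c t ih =>
    simp only [List.foldl_cons, List.flatMap_cons, ih]
    rw [← aba_step_eq c]
    split_ifs <;> simp

-- ===== VERDICT (by name: the statement is the Claim_ definition above) =====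
theorem aba_translate_spec : Claim_equal_aba_translate := by
  intro s _
  unfold Spec_aba_translate aba_translate aba_translate_alt
  dsimp only
  rw [aba_fold_eq]
  simp
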